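-- pv_equiv track=rewrite | github.com/google-deepmind/deepmind-research | fusion_tcv/named_array.py | lengths_to_ranges
-- ===== SOURCE A (Python) =====
-- from typing import Iterable, List, Mapping, MutableMapping, Tuple, Union
--
-- def lengths_to_ranges(
--     lengths: Mapping[str, int]) -> MutableMapping[str, List[int]]:
--   """Eg: {a: 2, b: 3} -> {a: [0, 1], b: [2, 3, 4]} ."""
--   ranges = {}
--   start = 0
--   for key, length in lengths.items():
--     ranges[key] = list(range(start, start + length))
--     start += length
--   return ranges
-- ===== SOURCE B (Python) =====
-- def lengths_to_ranges(lengths):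
--   """Eg: {a: 2, b: 3} -> {a: [0, 1], b: [2, 3, 4]} ."""
--   # Pass 1: prefix-sum table of boundary offsets (ends[i] = total length before key i).
--   ends = [0]
--   for length in lengths.values():
--     ends.append(ends[-1] + length)
--   # Pass 2: pair each key with its consecutive (start, end) boundary pair.
--   return {key: list(range(start, end))
--           for key, (start, end) in zip(lengths, zip(ends, ends[1:]))}
-- ===== Notes on version B (the rewrite author's own statement) =====
-- stated objective: alternative
-- what changed: Replaces the fused loop that threads a running start while building each range with a two-pass decomposition: first a prefix-sum table of boundary offsets, then zipping keys with consecutive (start, end) pairs to materialize the ranges.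
import Mathlib
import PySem

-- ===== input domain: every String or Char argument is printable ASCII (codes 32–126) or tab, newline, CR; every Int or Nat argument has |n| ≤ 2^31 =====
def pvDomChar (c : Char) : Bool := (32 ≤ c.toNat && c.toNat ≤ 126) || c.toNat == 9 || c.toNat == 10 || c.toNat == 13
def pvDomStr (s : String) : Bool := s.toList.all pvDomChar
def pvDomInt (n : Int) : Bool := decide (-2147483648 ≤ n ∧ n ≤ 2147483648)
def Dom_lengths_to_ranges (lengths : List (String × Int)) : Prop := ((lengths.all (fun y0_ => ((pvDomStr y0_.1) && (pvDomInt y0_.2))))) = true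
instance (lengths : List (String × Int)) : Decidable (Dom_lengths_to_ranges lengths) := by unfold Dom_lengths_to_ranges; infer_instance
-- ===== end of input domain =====

-- B replaces A's fused running-start loop by a separate prefix-sum boundary table zipped
-- with the keys (objective: alternative decomposition, same cost).

-- ===== PORT A =====
-- A: one fused loop threading (dict, start); ranges[key] = list(range(start, start+length)); start += length.
def lengths_to_ranges (lengths : List (String × Int)) : List (String × List Int) :=
  (lengths.foldl
    (fun (st : PySem.Dict String (List Int) × Int) kv =>
      (st.1.insert kv.1 (PySem.List.pyRange st.2 (st.2 + kv.2) 1), st.2 + kv.2))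
    (PySem.Dict.empty, 0)).1.items

-- ===== PORT B =====
-- B: pass 1 builds ends = [0] ++ running sums (ends.append(ends[-1] + length));
--    pass 2 zips keys with consecutive (start, end) pairs from ends and ends[1:].
def lengths_to_ranges_alt (lengths : List (String × Int)) : List (String × List Int) :=
  let ends : List Int := lengths.foldl
    (fun acc kv => acc ++ [(PySem.List.pyGet? acc (-1)).getD 0 + kv.2]) [0]
  (((lengths.map Prod.fst).zip (ends.zip (PySem.List.slice ends (some 1) none))).foldl
    (fun (d : PySem.Dict String (List Int)) q =>
      d.insert q.1 (PySem.List.pyRange q.2.1 q.2.2 1))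
    PySem.Dict.empty).items

-- ===== PRECONDITION & SPEC =====
def Spec_lengths_to_ranges (lengths : List (String × Int)) (out : List (String × List Int)) : Prop := out = lengths_to_ranges_alt lengths
instance (lengths : List (String × Int)) (out : List (String × List Int)) : Decidable (Spec_lengths_to_ranges lengths out) := by unfold Spec_lengths_to_ranges; infer_instance

-- ===== CLAIM (what is proved, stated in full; the proofs are below) =====
def Claim_equal_lengths_to_ranges : Prop := ∀ (lengths : List (String × Int)), Dom_lengths_to_ranges lengths → Spec_lengths_to_ranges lengths (lengths_to_ranges lengths)

-- ===== LEMMAS AND PROOFS =====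

-- The common sequence of (key, range) insertions, with running start s.
def pvRanges (s : Int) : List (String × Int) → List (String × List Int)
  | [] => []
  | (k, l) :: t => (k, PySem.List.pyRange s (s + l) 1) :: pvRanges (s + l) t

-- The boundary table starting at s: s, s + l₁, s + l₁ + l₂, …
def pvEnds (s : Int) : List (String × Int) → List Int
  | [] => [s]
  | (_, l) :: t => s :: pvEnds (s + l) t

lemma pvEnds_head (s : Int) (t : List (String × Int)) :
    pvEnds s t = s :: (pvEnds s t).drop 1 := by
  cases t <;> rfl

-- Pass 1 of B computes pvEnds.
lemma ends_foldl (t : List (String × Int)) (pre : List Int) (s : Int) :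
    t.foldl (fun acc kv => acc ++ [(PySem.List.pyGet? acc (-1)).getD 0 + kv.2]) (pre ++ [s])
      = pre ++ pvEnds s t := by
  induction t generalizing pre s with
  | nil => rfl
  | cons kv t ih =>
    simp only [List.foldl_cons, PySem.List.pyGet?_neg_one_append_singleton, Option.getD_some,
      pvEnds]
    rw [ih (pre ++ [s]) (s + kv.2)]
    simp

-- B's zipped pair list, mapped to the actual insertions, is pvRanges.
lemma zip_ends_eq (t : List (String × Int)) (s : Int) :
    ((t.map Prod.fst).zip ((pvEnds s t).zip ((pvEnds s t).drop 1))).map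
        (fun q => (q.1, PySem.List.pyRange q.2.1 q.2.2 1))
      = pvRanges s t := by
  induction t generalizing s with
  | nil => rfl
  | cons kv t ih =>
    obtain ⟨k, l⟩ := kv
    show (((k :: t.map Prod.fst)).zip ((s :: pvEnds (s + l) t).zip (pvEnds (s + l) t))).map _ = _
    rw [pvEnds_head (s + l) t]
    simp only [List.zip_cons_cons, List.map_cons, pvRanges]
    rw [← pvEnds_head (s + l) t]
    exact congrArg _ (ih (s + l))

-- A's fused loop inserts exactly pvRanges, in order.
lemma foldA_eq (t : List (String × Int)) (d : PySem.Dict String (List Int)) (s : Int) :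
    (t.foldl
      (fun (st : PySem.Dict String (List Int) × Int) kv =>
        (st.1.insert kv.1 (PySem.List.pyRange st.2 (st.2 + kv.2) 1), st.2 + kv.2)) (d, s)).1
      = (pvRanges s t).foldl (fun d p => d.insert p.1 p.2) d := by
  induction t generalizing d s with
  | nil => rfl
  | cons kv t ih => exact ih _ _

-- ===== VERDICT (by name: the statement is the Claim_ definition above) =====
theorem lengths_to_ranges_spec : Claim_equal_lengths_to_ranges := by
  intro lengths _
  show lengths_to_ranges lengths = lengths_to_ranges_alt lengths
  unfold lengths_to_ranges lengths_to_ranges_alt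
  have hends := ends_foldl lengths [] 0
  simp only [List.nil_append] at hends
  rw [hends]
  simp only [PySem.List.slice_from_one]
  rw [← List.drop_one, foldA_eq, ← zip_ends_eq lengths 0, List.foldl_map]
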